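-- pv_equiv track=rewrite | github.com/IdushaGaravi/In23-S1-CS1033---Programming-Fundamentals---Labs | Lab8/Exercise L8.E2/Exercise L8.E2.py | adjoint_matrix
-- ===== SOURCE A (Python) =====
-- def get_Minor_of_matrix(matrix_list, row, col):
--     """ get minors of the matrix"""
--     minor = [r[:col] + r[col+1:] for r in (matrix_list[:row] + matrix_list[row+1:])]
--     return minor
--
-- def get_cofactor(matrix_list, row, col):
--     """get cofactor corresponding to each minor"""
--     minor = get_Minor_of_matrix(matrix_list, row, col)
--     if (row + col)%2==0:        # multiply the determinant of each minor by + or - to get the cofactor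
--        cofactor = compute_determinant_of_matrix(minor)
--     else:
--         cofactor = (-1) * (compute_determinant_of_matrix(minor))
--     return cofactor
--
-- def get_transpose_matrix(matrix):
--     """get the transpose of a given matrix"""
--     transpose = [[matrix[m][n] for m in range(len(matrix))] for n in range(len(matrix[0]))]
--     return transpose
--
-- def adjoint_matrix(matrix_list):
--     """ compute the cofactor matrix and get adjoint matrix"""
--     all_minors_cofactors = []
--     for row in range(len(matrix_list)):
--         row_minors_cofactors = []
--         for col in range(len(matrix_list[0])):
--             minor_cofactor = get_cofactor(matrix_list, row, col)
--             row_minors_cofactors.append(minor_cofactor)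
--         all_minors_cofactors.append(row_minors_cofactors)       # get all cofactors
--
--     transpose_of_all_cofactors = get_transpose_matrix(all_minors_cofactors)     # get the adjoint of cofactor matrix to build adjoint matrix
--     return transpose_of_all_cofactors
--
-- def compute_determinant_of_matrix(matrix_list):
--     """ calculate the determinant of the matrix"""
--     if len(matrix_list) == 1:       # gat base case as 1x1 matrix
--         return matrix_list[0][0]
--
--     determinant = 0
--     for k in range(len(matrix_list)):
--         minor = get_Minor_of_matrix(matrix_list, 0, k)
--         determinant += (matrix_list[0][k])*((-1)**(k)) * (compute_determinant_of_matrix(minor))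
--     return determinant
-- ===== SOURCE B (Python) =====
-- def _signed_perms(n):
--     """All permutations of range(n) paired with their signs, built by
--     choosing the image of 0 and shifting a permutation of the rest."""
--     if n == 0:
--         return [(1, [])]
--     sub = _signed_perms(n - 1)
--     res = []
--     for k in range(n):
--         sk = (-1) ** k
--         for s, q in sub:
--             res.append((sk * s, [k] + [x if x < k else x + 1 for x in q]))
--     return res
--
--
-- def _minor(matrix_list, i, j):
--     """Rows of matrix_list except row i, with entry j dropped from each."""
--     return [row[:j] + row[j + 1:] for t, row in enumerate(matrix_list) if t != i]
--
--
-- def _det(m, perms):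
--     """Leibniz determinant: sum of signed products over the given permutations."""
--     total = 0
--     for s, p in perms:
--         prod = s
--         for i in range(len(m)):
--             prod *= m[i][p[i]]
--         total += prod
--     return total
--
--
-- def adjoint_matrix(matrix_list):
--     n = len(matrix_list)
--     perms = _signed_perms(n - 1)
--     return [[(-1) ** (i + j) * _det(_minor(matrix_list, i, j), perms)
--              for i in range(n)]
--             for j in range(n)]
-- ===== Notes on version B (the rewrite author's own statement) =====
-- stated objective: alternative
-- what changed: Each cofactor determinant is computed by the Leibniz formula over a signed-permutation list generated once and shared by all n^2 cofactors, and the adjoint rows are built directly in transposed order, instead of A's per-entry recursive minor-slicing expansion followed by a transpose pass.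
-- intended difference: On 1x1 matrices A returns [[0]] because its determinant of the empty 0x0 minor is 0, while B returns the correct adjugate [[1]] (the empty product/determinant is 1, and adj(M)*M = det(M)*I requires it). — e.g. on adjoint_matrix([[5]]): A returns [[0]], B returns [[1]]
-- outside the precondition, e.g. on adjoint_matrix([[1, 2, 3], [4, 5, 6]]): A returns [[5, -2], [-4, 1], [4, -1]], B returns [[5, -2], [-4, 1]]
import Mathlib
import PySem

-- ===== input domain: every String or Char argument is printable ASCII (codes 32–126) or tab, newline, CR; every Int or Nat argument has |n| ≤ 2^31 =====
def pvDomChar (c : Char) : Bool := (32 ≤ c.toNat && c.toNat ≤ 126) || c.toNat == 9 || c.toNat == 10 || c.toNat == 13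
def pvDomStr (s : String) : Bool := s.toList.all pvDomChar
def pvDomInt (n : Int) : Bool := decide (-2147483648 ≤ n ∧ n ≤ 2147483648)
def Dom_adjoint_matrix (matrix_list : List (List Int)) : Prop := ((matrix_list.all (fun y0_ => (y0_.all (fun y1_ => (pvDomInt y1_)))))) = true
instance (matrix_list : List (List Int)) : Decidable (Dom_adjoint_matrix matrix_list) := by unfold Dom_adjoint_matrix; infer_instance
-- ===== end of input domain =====

-- B replaces A's per-entry recursive cofactor expansion (with a final transpose pass) by the
-- Leibniz formula over a signed-permutation table built once and shared by all cofactors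
-- (objective: alternative).  On 1x1 input A returns [[0]], B the intended [[1]] (see D_ below).

-- ===== PORT A =====
-- get_Minor_of_matrix
def pvMinorA (m : List (List Int)) (row col : Int) : List (List Int) :=
  (PySem.List.slice m none (some row) ++ PySem.List.slice m (some (row + 1)) none).map
    (fun r => PySem.List.slice r none (some col) ++ PySem.List.slice r (some (col + 1)) none)

theorem pvSliceZero {α : Type} (m : List α) :
    PySem.List.slice m none (some (0 : Int)) = [] := by
  have h : ((0 : Nat) : Int) = (0 : Int) := rfl
  rw [← h, PySem.List.slice_to_natCast]
  simp

theorem pvMinorA_len_lt (m : List (List Int)) (c : Int) (h : 0 < m.length) :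
    (pvMinorA m 0 c).length < m.length := by
  unfold pvMinorA
  simp only [show (0 : Int) + 1 = 1 from rfl]
  rw [PySem.List.slice_from_one, pvSliceZero]
  simp only [List.length_map, List.length_append, List.length_nil, List.length_tail,
    Nat.zero_add]
  omega

-- compute_determinant_of_matrix
def pvDetA (m : List (List Int)) : Int :=
  if m.length = 1 then PySem.List.pyGetD (PySem.List.pyGetD m 0 []) 0 0
  else
    (PySem.List.pyRange 0 m.length 1).attach.foldl
      (fun det k =>
        det + PySem.List.pyGetD (PySem.List.pyGetD m 0 []) k.1 0 * (-1) ^ k.1.toNat *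
          pvDetA (pvMinorA m 0 k.1))
      0
termination_by m.length
decreasing_by
  exact pvMinorA_len_lt m k.1 (by
    have := k.2
    have h0 : (0 : Int) ≤ k.1 ∧ k.1 < m.length := (PySem.List.mem_pyRange_one).1 this
    omega)

-- get_cofactor
def pvCofA (m : List (List Int)) (row col : Int) : Int :=
  if PySem.Int.mod (row + col) 2 = 0 then pvDetA (pvMinorA m row col)
  else (-1) * pvDetA (pvMinorA m row col)

-- get_transpose_matrix
def pvTransposeA (mat : List (List Int)) : List (List Int) :=
  (PySem.List.pyRange 0 (PySem.List.pyGetD mat 0 []).length 1).map (fun nn =>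
    (PySem.List.pyRange 0 mat.length 1).map (fun mm =>
      PySem.List.pyGetD (PySem.List.pyGetD mat mm []) nn 0))

def adjoint_matrix (matrix_list : List (List Int)) : List (List Int) :=
  pvTransposeA
    ((PySem.List.pyRange 0 matrix_list.length 1).map (fun row =>
      (PySem.List.pyRange 0 (PySem.List.pyGetD matrix_list 0 []).length 1).map (fun col =>
        pvCofA matrix_list row col)))

-- ===== PORT B =====
-- _signed_perms
def pvSignedPerms : Nat → List (Int × List Int)
  | 0 => [(1, [])]
  | n + 1 =>
    (List.range (n + 1)).flatMap (fun (k : Nat) =>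
      (pvSignedPerms n).map (fun sq =>
        (((((-1 : Int) ^ k) : Int) * sq.1,
         (k : Int) :: sq.2.map (fun x => if x < (k : Int) then x else x + 1)) : Int × List Int)))

-- _minor
def pvMinorB (m : List (List Int)) (i j : Int) : List (List Int) :=
  ((PySem.List.enumerate m 0).filter (fun p => p.1 != i)).map
    (fun p => PySem.List.slice p.2 none (some j) ++ PySem.List.slice p.2 (some (j + 1)) none)

-- _det
def pvDetB (m : List (List Int)) (perms : List (Int × List Int)) : Int :=
  perms.foldl
    (fun total sp =>
      total + (PySem.List.pyRange 0 m.length 1).foldl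
        (fun prod i =>
          prod * PySem.List.pyGetD (PySem.List.pyGetD m i []) (PySem.List.pyGetD sp.2 i 0) 0)
        sp.1)
    0

def adjoint_matrix_alt (matrix_list : List (List Int)) : List (List Int) :=
  let n := matrix_list.length
  let perms := pvSignedPerms (n - 1)
  (PySem.List.pyRange 0 n 1).map (fun j =>
    (PySem.List.pyRange 0 n 1).map (fun i =>
      (-1 : Int) ^ (i + j).toNat * pvDetB (pvMinorB matrix_list i j) perms))

-- ===== PRECONDITION & SPEC =====
-- Pre_ restricts to nonempty SQUARE matrices, the natural domain of the adjoint: on ragged or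
-- non-square input A either raises (IndexError) or returns shapes/values that are artefacts of
-- its mismatched loop bounds (it reads len(matrix_list[0]) for columns), not an adjoint.
def Pre_adjoint_matrix (matrix_list : List (List Int)) : Prop :=
  matrix_list ≠ [] ∧ ∀ r ∈ matrix_list, r.length = matrix_list.length
instance (matrix_list : List (List Int)) : Decidable (Pre_adjoint_matrix matrix_list) := by
  unfold Pre_adjoint_matrix; infer_instance
def pvWitness_adjoint_matrix : List (List Int) := [[1, 2], [3, 4]]

-- On 1x1 matrices A returns [[0]] (its determinant of the empty 0x0 minor is 0) while B returns
-- [[1]], the intended adjugate: the empty determinant is 1, and adj(M)*M = det(M)*I requires it.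
def D_adjoint_matrix (matrix_list : List (List Int)) : Prop := matrix_list.length = 1
instance (matrix_list : List (List Int)) : Decidable (D_adjoint_matrix matrix_list) := by
  unfold D_adjoint_matrix; infer_instance

def Spec_adjoint_matrix (matrix_list : List (List Int)) (out : List (List Int)) : Prop :=
  ¬ D_adjoint_matrix matrix_list → out = adjoint_matrix_alt matrix_list
instance (matrix_list : List (List Int)) (out : List (List Int)) :
    Decidable (Spec_adjoint_matrix matrix_list out) := by
  unfold Spec_adjoint_matrix; infer_instance

def pvDiffWitness_adjoint_matrix : List (List Int) := [[5]]
def pvDiffWitnessOut_adjoint_matrix : (List (List Int)) × (List (List Int)) := ([[0]], [[1]])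

-- ===== CLAIM (what is proved, stated in full; the proofs are below) =====
def Claim_unchanged_adjoint_matrix : Prop := ∀ (matrix_list : List (List Int)), Dom_adjoint_matrix matrix_list → Pre_adjoint_matrix matrix_list → Spec_adjoint_matrix matrix_list (adjoint_matrix matrix_list)
def Claim_changed_adjoint_matrix : Prop := Dom_adjoint_matrix (pvDiffWitness_adjoint_matrix) ∧ Pre_adjoint_matrix (pvDiffWitness_adjoint_matrix) ∧ D_adjoint_matrix (pvDiffWitness_adjoint_matrix) ∧ adjoint_matrix (pvDiffWitness_adjoint_matrix) = pvDiffWitnessOut_adjoint_matrix.1 ∧ adjoint_matrix_alt (pvDiffWitness_adjoint_matrix) = pvDiffWitnessOut_adjoint_matrix.2 ∧ pvDiffWitnessOut_adjoint_matrix.1 ≠ pvDiffWitnessOut_adjoint_matrix.2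
def Claim_exact_adjoint_matrix : Prop := ∀ (matrix_list : List (List Int)), Dom_adjoint_matrix matrix_list → Pre_adjoint_matrix matrix_list → D_adjoint_matrix matrix_list → adjoint_matrix matrix_list ≠ adjoint_matrix_alt matrix_list

-- ===== LEMMAS AND PROOFS =====

-- A's sliced minor and B's enumerate-filtered minor are both "delete row i, delete column j".
def pvErase (m : List (List Int)) (i j : Nat) : List (List Int) :=
  (m.eraseIdx i).map (fun r => r.eraseIdx j)

-- the Leibniz term of one signed permutation, and the Leibniz normal form of a determinant
def pvTerm (m : List (List Int)) (n : Nat) (sp : Int × List Int) : Int :=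
  sp.1 * ((List.range n).map (fun i => (m.getD i []).getD (sp.2.getD i 0).toNat 0)).prod

def pvDetNF (n : Nat) (m : List (List Int)) : Int :=
  ((pvSignedPerms n).map (pvTerm m n)).sum

theorem pvRowErase {α : Type} (r : List α) (j : Nat) :
    PySem.List.slice r none (some (j : Int)) ++ PySem.List.slice r (some ((j : Int) + 1)) none
      = r.eraseIdx j := by
  have h1 : ((j : Int) + 1) = ((j + 1 : Nat) : Int) := by push_cast; ring
  rw [PySem.List.slice_to_natCast, h1, PySem.List.slice_from_natCast,
    List.eraseIdx_eq_take_drop_succ]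

theorem pvMinorA_eq (m : List (List Int)) (i j : Nat) :
    pvMinorA m (i : Int) (j : Int) = pvErase m i j := by
  unfold pvMinorA pvErase
  rw [pvRowErase m i]
  exact List.map_congr_left (fun r _ => pvRowErase r j)

theorem pvEnumKeep (t : List (List Int)) (u s : Int) (h : s < u) :
    (PySem.List.enumerate t u).filter (fun p => p.1 != s) = PySem.List.enumerate t u := by
  apply List.filter_eq_self.2
  intro p hp
  obtain ⟨k, hk, rfl⟩ := (PySem.List.mem_enumerate_iff t u p).1 hp
  simp only [bne_iff_ne, ne_eq]
  omega

theorem pvEnumMapSnd (f : List Int → List Int) (t : List (List Int)) (u : Int) :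
    (PySem.List.enumerate t u).map (fun p => f p.2) = t.map f := by
  have : (fun (p : Int × List Int) => f p.2) = f ∘ (fun p => p.2) := rfl
  rw [this, ← List.map_map, PySem.List.map_snd_enumerate]

theorem pvEnumFilter (f : List Int → List Int) :
    ∀ (m : List (List Int)) (i : Nat) (s : Int),
      ((PySem.List.enumerate m s).filter (fun p => p.1 != s + (i : Int))).map (fun p => f p.2)
        = (m.eraseIdx i).map f := by
  intro m
  induction m with
  | nil => intro i s; simp [PySem.List.enumerate]
  | cons r t ih =>
    intro i s
    rw [PySem.List.enumerate_cons]
    cases i with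
    | zero =>
      simp only [Nat.cast_zero, add_zero, List.eraseIdx_zero, List.tail_cons]
      rw [List.filter_cons]
      simp only [bne_self_eq_false, Bool.false_eq_true, if_false]
      rw [pvEnumKeep t (s + 1) s (by omega), pvEnumMapSnd]
    | succ i =>
      have hkeep : ((s : Int) != s + ((i + 1 : Nat) : Int)) = true := by
        simp only [bne_iff_ne, ne_eq]
        push_cast
        omega
      rw [List.filter_cons, hkeep]
      simp only [if_true, List.map_cons, List.eraseIdx_cons_succ]
      have hpred : (fun (p : Int × List Int) => p.1 != s + ((i + 1 : Nat) : Int))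
          = (fun (p : Int × List Int) => p.1 != (s + 1) + ((i : Nat) : Int)) := by
        funext p
        have : s + ((i + 1 : Nat) : Int) = (s + 1) + ((i : Nat) : Int) := by push_cast; ring
        rw [this]
      rw [hpred, ih i (s + 1)]

theorem pvEnumFilter0 (f : List Int → List Int) (m : List (List Int)) (i : Nat) :
    ((PySem.List.enumerate m 0).filter (fun p => p.1 != (i : Int))).map (fun p => f p.2)
      = (m.eraseIdx i).map f := by
  have h := pvEnumFilter f m i 0
  simpa using h

theorem pvMinorB_eq (m : List (List Int)) (i j : Nat) :
    pvMinorB m (i : Int) (j : Int) = pvErase m i j := by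
  unfold pvMinorB pvErase
  rw [pvEnumFilter0 (fun r => PySem.List.slice r none (some (j : Int)) ++ PySem.List.slice r (some ((j : Int) + 1)) none) m i]
  exact List.map_congr_left (fun r _ => pvRowErase r j)

theorem pvPerms_mem : ∀ (n : Nat) (sp : Int × List Int), sp ∈ pvSignedPerms n →
    sp.2.length = n ∧ ∀ x ∈ sp.2, 0 ≤ x ∧ x < (n : Int) := by
  intro n
  induction n with
  | zero =>
    intro sp h
    have hsp : sp = (1, ([] : List Int)) := by simpa [pvSignedPerms] using h
    subst hsp
    simp
  | succ n ih =>
    intro sp h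
    simp only [pvSignedPerms, List.mem_flatMap, List.mem_map, List.mem_range] at h
    obtain ⟨k, hk, sq, hsq, rfl⟩ := h
    obtain ⟨hlen, hbnd⟩ := ih sq hsq
    refine ⟨by simp [hlen], ?_⟩
    intro x hx
    simp only [List.mem_cons, List.mem_map] at hx
    rcases hx with rfl | ⟨y, hy, rfl⟩
    · constructor <;> [positivity; (push_cast; omega)]
    · obtain ⟨hy0, hyn⟩ := hbnd y hy
      split_ifs <;> constructor <;> push_cast <;> omega

theorem pvFoldlMul {α : Type} (g : α → Int) : ∀ (l : List α) (s : Int),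
    l.foldl (fun a x => a * g x) s = s * (l.map g).prod := by
  intro l
  induction l with
  | nil => intro s; simp
  | cons x t ih =>
    intro s
    rw [List.foldl_cons, ih, List.map_cons, List.prod_cons]
    ring

theorem pvGetDNonneg (l : List Int) (k : Nat) (h : ∀ x ∈ l, (0:Int) ≤ x) :
    (0:Int) ≤ l.getD k 0 := by
  rcases lt_or_ge k l.length with hlt | hge
  · rw [List.getD_eq_getElem l 0 hlt]
    exact h _ (List.getElem_mem hlt)
  · rw [List.getD_eq_default l 0 hge]

theorem pvGetDInt (l : List Int) (x : Int) (hx : (0:Int) ≤ x) (d : Int) :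
    PySem.List.pyGetD l x d = l.getD x.toNat d := by
  rw [← Int.toNat_of_nonneg hx, PySem.List.pyGetD_natCast, Int.toNat_natCast]

theorem pvDetB_eq (m : List (List Int)) (perms : List (Int × List Int))
    (h : ∀ sp ∈ perms, ∀ x ∈ sp.2, (0:Int) ≤ x) :
    pvDetB m perms = (perms.map (pvTerm m m.length)).sum := by
  unfold pvDetB
  rw [PySem.List.foldl_add, zero_add]
  congr 1
  apply List.map_congr_left
  intro sp hsp
  rw [PySem.List.pyRange_zero, List.foldl_map, pvFoldlMul, Int.toNat_natCast]
  unfold pvTerm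
  congr 1
  apply congrArg List.prod
  apply List.map_congr_left
  intro k _
  rw [PySem.List.pyGetD_natCast, PySem.List.pyGetD_natCast]
  rw [pvGetDInt (m.getD k []) (sp.2.getD k 0) (pvGetDNonneg sp.2 k (h sp hsp)) 0]

theorem pvEraseGetD (r : List Int) (k : Nat) (y : Int) (hy : (0:Int) ≤ y) :
    (r.eraseIdx k).getD y.toNat 0 = r.getD ((if y < (k:Int) then y else y + 1).toNat) 0 := by
  rw [List.getD_eq_getElem?_getD, List.getD_eq_getElem?_getD]
  split_ifs with hyk
  · rw [List.getElem?_eraseIdx_of_lt (by omega)]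
  · rw [List.getElem?_eraseIdx_of_ge (by omega)]
    have : (y + 1).toNat = y.toNat + 1 := by omega
    rw [this]

set_option maxHeartbeats 2000000 in
theorem pvDetA_eq : ∀ (n : Nat), 0 < n → ∀ (m : List (List Int)), m.length = n →
    (∀ r ∈ m, r.length = n) → pvDetA m = pvDetNF n m := by
  intro n
  induction n with
  | zero => intro h; omega
  | succ n ih =>
    intro _ m hlen hrows
    rcases Nat.eq_zero_or_pos n with rfl | hn
    · -- 1x1 base case
      match m, hlen with
      | [r], _ =>
        have hr : r.length = 1 := hrows r (by simp)
        match r, hr with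
        | [a], _ =>
          have hL : pvDetA [[a]] = a := by
            rw [pvDetA, if_pos (by simp : ([[a]] : List (List Int)).length = 1)]
            rfl
          have hR : pvDetNF 1 [[a]] = a := by
            unfold pvDetNF pvTerm
            simp [pvSignedPerms, List.range_one]
          rw [hL, hR]
    · -- m.length = n + 1 with 1 ≤ n
      match m, hlen with
      | r0 :: t, hlen =>
        have ht : t.length = n := by simpa using hlen
        have hne : ¬ (r0 :: t).length = 1 := by simp [ht]; omega
        rw [pvDetA, if_neg hne]
        rw [List.foldl_attach (l := PySem.List.pyRange 0 ((r0 :: t).length : Int) 1)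
          (f := fun det k => det + PySem.List.pyGetD (PySem.List.pyGetD (r0 :: t) 0 []) k 0 *
            (-1) ^ k.toNat * pvDetA (pvMinorA (r0 :: t) 0 k)) (b := 0)]
        rw [PySem.List.foldl_add, zero_add]
        simp only [List.length_cons, ht]
        rw [PySem.List.pyRange_zero, Int.toNat_natCast, List.map_map]
        -- right-hand side as a double sum
        unfold pvDetNF
        simp only [pvSignedPerms]
        rw [List.map_flatMap, List.flatMap_def, List.sum_flatten, List.map_map]
        congr 1
        apply List.map_congr_left
        intro k hk
        have hkn : k < n + 1 := List.mem_range.1 hk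
        simp only [Function.comp_def]
        -- evaluate the A-side coefficient
        rw [PySem.List.pyGetD_zero, PySem.List.pyGetD_natCast, Int.toNat_natCast]
        have hminor : pvMinorA (r0 :: t) 0 (k : Int) = pvErase (r0 :: t) 0 k := by
          have h0 : (0 : Int) = ((0 : Nat) : Int) := rfl
          rw [h0, pvMinorA_eq]
        rw [hminor]
        have herase : pvErase (r0 :: t) 0 k = t.map (fun r => r.eraseIdx k) := by
          unfold pvErase
          rw [List.eraseIdx_zero, List.tail_cons]
        have hmlen : (pvErase (r0 :: t) 0 k).length = n := by
          rw [herase, List.length_map, ht]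
        have hmrows : ∀ r ∈ pvErase (r0 :: t) 0 k, r.length = n := by
          rw [herase]
          intro r hr
          obtain ⟨r', hr', rfl⟩ := List.mem_map.1 hr
          have : r'.length = n + 1 := hrows r' (List.mem_cons_of_mem _ hr')
          rw [List.length_eraseIdx_of_lt (by omega)]
          omega
        rw [ih hn _ hmlen hmrows]
        unfold pvDetNF
        rw [← List.sum_map_mul_left, List.map_map]
        apply congrArg List.sum
        apply List.map_congr_left
        intro sq hsq
        obtain ⟨hqlen, hqbnd⟩ := pvPerms_mem n sq hsq
        simp only [Function.comp_def]
        unfold pvTerm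
        rw [List.range_succ_eq_map, List.map_cons, List.prod_cons, List.map_map]
        simp only [List.getD_cons_zero, List.getD_cons_succ, Int.toNat_natCast, Function.comp_def,
          Nat.succ_eq_add_one]
        have hprods : ((List.range n).map (fun i =>
            ((pvErase (r0 :: t) 0 k).getD i []).getD ((sq.2.getD i 0).toNat) 0)).prod
            = ((List.range n).map (fun i =>
            (t.getD i []).getD (((sq.2.map (fun x => if x < (k : Int) then x else x + 1)).getD i 0).toNat) 0)).prod := by
          apply congrArg List.prod
          apply List.map_congr_left
          intro i hi
          have hin : i < n := List.mem_range.1 hi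
          have hit : i < t.length := by omega
          have hiq : i < sq.2.length := by omega
          have hminget : (pvErase (r0 :: t) 0 k).getD i [] = (t.getD i []).eraseIdx k := by
            rw [herase, List.getD_eq_getElem _ _ (by simpa using hit),
              List.getD_eq_getElem _ _ hit]
            simp
          have hadj : (sq.2.map (fun x => if x < (k : Int) then x else x + 1)).getD i 0
              = (fun x => if x < (k : Int) then x else x + 1) (sq.2.getD i 0) := by
            rw [List.getD_eq_getElem _ _ (by simpa using hiq), List.getD_eq_getElem _ _ hiq]
            simp
          rw [hminget, hadj]
          exact pvEraseGetD (t.getD i []) k (sq.2.getD i 0)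
            (pvGetDNonneg sq.2 i (fun x hx => (hqbnd x hx).1))
        rw [hprods]
        ring

theorem pvCof_eq (m : List (List Int)) (n : Nat) (hn : 2 ≤ n) (hlen : m.length = n)
    (hrows : ∀ r ∈ m, r.length = n) (b a : Nat) (hb : b < n) (ha : a < n) :
    pvCofA m (b : Int) (a : Int)
      = (-1 : Int) ^ (((b : Int) + (a : Int)).toNat) *
          pvDetB (pvMinorB m (b : Int) (a : Int)) (pvSignedPerms (n - 1)) := by
  have hmlen : (pvErase m b a).length = n - 1 := by
    unfold pvErase
    rw [List.length_map, List.length_eraseIdx_of_lt (by omega), hlen]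
  have hmrows : ∀ r ∈ pvErase m b a, r.length = n - 1 := by
    intro r hr
    obtain ⟨r', hr', rfl⟩ := List.mem_map.1 hr
    have : r'.length = n := hrows r' (List.mem_of_mem_eraseIdx hr')
    rw [List.length_eraseIdx_of_lt (by omega), this]
  have hdetB : pvDetB (pvMinorB m (b : Int) (a : Int)) (pvSignedPerms (n - 1))
      = pvDetNF (n - 1) (pvErase m b a) := by
    rw [pvMinorB_eq, pvDetB_eq _ _ (fun sp hsp x hx => ((pvPerms_mem _ sp hsp).2 x hx).1)]
    unfold pvDetNF
    rw [hmlen]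
  have hdetA : pvDetA (pvMinorA m (b : Int) (a : Int)) = pvDetNF (n - 1) (pvErase m b a) := by
    rw [pvMinorA_eq]
    exact pvDetA_eq (n - 1) (by omega) _ hmlen hmrows
  have htn : (((b : Int) + (a : Int))).toNat = b + a := by omega
  unfold pvCofA
  rw [hdetA, hdetB, htn]
  have hmod : PySem.Int.mod ((b : Int) + (a : Int)) 2 = (((b + a) % 2 : Nat) : Int) := by
    push_cast
    exact_mod_cast PySem.Int.mod_natCast (b + a) 2
  rw [hmod]
  rcases Nat.even_or_odd (b + a) with he | ho
  · rw [if_pos (by exact_mod_cast Nat.even_iff.1 he), Even.neg_one_pow he, one_mul]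
  · rw [if_neg (by
        have := Nat.odd_iff.1 ho
        simp [this]), Odd.neg_one_pow ho]


theorem pvDetA_nil : pvDetA [] = 0 := by
  have h : PySem.List.pyRange 0 ((([] : List (List Int)).length : Nat) : Int) 1 = [] := by
    decide
  rw [pvDetA, if_neg (by decide), h]
  rfl

theorem pvMinorA_one (x : Int) : pvMinorA [[x]] 0 0 = [] := by
  unfold pvMinorA
  simp only [show (0 : Int) + 1 = 1 from rfl]
  rw [PySem.List.slice_from_one, pvSliceZero]
  simp

theorem pvMinorB_one (x : Int) : pvMinorB [[x]] 0 0 = [] := by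
  simp [pvMinorB, PySem.List.enumerate]

theorem pvCofA_one (x : Int) : pvCofA [[x]] 0 0 = 0 := by
  unfold pvCofA
  rw [pvMinorA_one, pvDetA_nil]
  norm_num [show PySem.Int.mod (0 + 0) 2 = 0 from rfl]

theorem pvAdjA_one (x : Int) : adjoint_matrix [[x]] = [[0]] := by
  have hr : PySem.List.pyRange 0 (1 : Int) 1 = [0] := by decide
  have hg : PySem.List.pyGetD [[x]] (0 : Int) [] = [x] := rfl
  simp only [adjoint_matrix, hg, List.length_singleton, Nat.cast_one, hr, List.map_cons,
    List.map_nil, pvCofA_one]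
  decide

theorem pvAdjB_one (x : Int) : adjoint_matrix_alt [[x]] = [[1]] := by
  have hr : PySem.List.pyRange 0 (1 : Int) 1 = [0] := by decide
  simp only [adjoint_matrix_alt, List.length_singleton, Nat.cast_one, hr, List.map_cons,
    List.map_nil, pvMinorB_one]
  simp [pvSignedPerms, pvDetB]

-- ===== VERDICT (by name: the statement is the Claim_ definition above) =====
theorem adjoint_matrix_spec : Claim_unchanged_adjoint_matrix := by
  intro m hdom hpre
  obtain ⟨hne, hsq⟩ := hpre
  intro hnd
  have h1 : 0 < m.length := List.length_pos_of_ne_nil hne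
  have hn2 : 2 ≤ m.length := by
    rcases Nat.lt_or_ge m.length 2 with h | h
    · exfalso
      apply hnd
      unfold D_adjoint_matrix
      omega
    · exact h
  have hrow0 : (PySem.List.pyGetD m 0 []).length = m.length := by
    cases m with
    | nil => simp at h1
    | cons r t =>
      rw [PySem.List.pyGetD_zero_cons]
      exact hsq r (by simp)
  simp only [adjoint_matrix, adjoint_matrix_alt, pvTransposeA, hrow0]
  have hall0 : PySem.List.pyGetD
      ((PySem.List.pyRange 0 (m.length : Int) 1).map (fun row =>
        (PySem.List.pyRange 0 (m.length : Int) 1).map (fun col => pvCofA m row col))) 0 []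
      = (PySem.List.pyRange 0 (m.length : Int) 1).map (fun col => pvCofA m 0 col) := by
    have h := PySem.List.pyGetD_map_pyRange (fun row =>
      (PySem.List.pyRange 0 (m.length : Int) 1).map (fun col => pvCofA m row col))
      m.length 0 [] (by omega)
    simpa using h
  rw [hall0]
  simp only [List.length_map, PySem.List.length_pyRange_one, sub_zero, Int.toNat_natCast]
  apply List.map_congr_left
  intro j hj
  obtain ⟨a, ha, rfl⟩ : ∃ a : Nat, a < m.length ∧ j = (a : Int) := by
    have hjb := (PySem.List.mem_pyRange_one).1 hj
    exact ⟨j.toNat, by omega, by omega⟩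
  apply List.map_congr_left
  intro i hi
  obtain ⟨b, hb, rfl⟩ : ∃ b : Nat, b < m.length ∧ i = (b : Int) := by
    have hib := (PySem.List.mem_pyRange_one).1 hi
    exact ⟨i.toNat, by omega, by omega⟩
  rw [PySem.List.pyGetD_map_pyRange _ m.length b [] hb,
    PySem.List.pyGetD_map_pyRange _ m.length a 0 ha]
  exact pvCof_eq m m.length hn2 rfl hsq b a hb ha

theorem adjoint_matrix_changed : Claim_changed_adjoint_matrix := by
  unfold Claim_changed_adjoint_matrix pvDiffWitness_adjoint_matrix pvDiffWitnessOut_adjoint_matrix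
  exact ⟨by decide, by decide, by decide, pvAdjA_one 5, pvAdjB_one 5, by decide⟩

theorem adjoint_matrix_tight : Claim_exact_adjoint_matrix := by
  intro m hdom hpre hd
  obtain ⟨hne, hsq⟩ := hpre
  have h1 : m.length = 1 := hd
  match m, h1 with
  | [r], _ =>
    have hr : r.length = 1 := by
      have := hsq r (by simp)
      simpa using this
    match r, hr with
    | [x], _ =>
      rw [pvAdjA_one, pvAdjB_one]
      simp
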